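-- pv_equiv track=rewrite | github.com/LimJih00n/CODE_TEST | 250410/마법의 숲 탐색/magical-forest-exploration.py | fary_move
-- ===== SOURCE A (Python) =====
-- move_dir =[#상우하좌
--     (-1,0),
--     (0,1),
--     (1,0),
--     (0,-1)
-- ]
--
-- def fary_move(g_num,golem_dic,arr):
--     cr,cc = golem_dic[g_num]["center"]
--     cur_num = g_num
--     visted = set()
--     max_node=[cr,cc]
--
--     def dfs(r,c,v):
--
--         if (r,c) in visted or arr[r][c]==1 or arr[r][c]==0:
--             return
--
--         visted.add((r,c))
--         if max_node[0] < r: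
--             max_node[0],max_node[1] = r,c
--
--         for move in move_dir:
--             nr,nc = r+move[0],c+move[1]
--             if arr[nr][nc]==v:
--                 dfs(nr,nc,v)
--             else:
--                 if (r,c) == golem_dic[v]["exit"]: # 위에서 and로 엮으면 안된다.
--                     dfs(nr, nc, arr[nr][nc])
--
--
--     dfs(cr,cc, g_num)
--     return max_node
-- ===== SOURCE B (Python) =====
-- move_dir = [  # up right down left
--     (-1, 0),
--     (0, 1),
--     (1, 0),
--     (0, -1)
-- ]
--
-- def fary_move(g_num, golem_dic, arr):
--     cr, cc = golem_dic[g_num]["center"]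
--     visited = set()
--     max_node = [cr, cc]
--     stack = [(cr, cc, g_num)]
--     while stack:
--         r, c, v = stack.pop()
--         if (r, c) in visited:
--             continue
--         cell = arr[r][c]
--         if cell == 1 or cell == 0:
--             continue
--         visited.add((r, c))
--         if max_node[0] < r:
--             max_node[0], max_node[1] = r, c
--         children = []
--         for dr, dc in move_dir:
--             nr, nc = r + dr, c + dc
--             ncell = arr[nr][nc]
--             if ncell == v:
--                 children.append((nr, nc, v))
--             elif (r, c) == golem_dic[v]["exit"]:
--                 children.append((nr, nc, ncell))
--         stack.extend(reversed(children))
--     return max_node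
-- ===== Notes on version B (the rewrite author's own statement) =====
-- stated objective: alternative
-- what changed: A's recursive DFS mutating shared visited/max state is replaced by an iterative DFS over an explicit stack of (r, c, v) frames, with the visited/wall guard applied at pop time and each cell's admissible children pushed so that pop order preserves A's pre-order (which the strict-max update depends on).
import Mathlib
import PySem

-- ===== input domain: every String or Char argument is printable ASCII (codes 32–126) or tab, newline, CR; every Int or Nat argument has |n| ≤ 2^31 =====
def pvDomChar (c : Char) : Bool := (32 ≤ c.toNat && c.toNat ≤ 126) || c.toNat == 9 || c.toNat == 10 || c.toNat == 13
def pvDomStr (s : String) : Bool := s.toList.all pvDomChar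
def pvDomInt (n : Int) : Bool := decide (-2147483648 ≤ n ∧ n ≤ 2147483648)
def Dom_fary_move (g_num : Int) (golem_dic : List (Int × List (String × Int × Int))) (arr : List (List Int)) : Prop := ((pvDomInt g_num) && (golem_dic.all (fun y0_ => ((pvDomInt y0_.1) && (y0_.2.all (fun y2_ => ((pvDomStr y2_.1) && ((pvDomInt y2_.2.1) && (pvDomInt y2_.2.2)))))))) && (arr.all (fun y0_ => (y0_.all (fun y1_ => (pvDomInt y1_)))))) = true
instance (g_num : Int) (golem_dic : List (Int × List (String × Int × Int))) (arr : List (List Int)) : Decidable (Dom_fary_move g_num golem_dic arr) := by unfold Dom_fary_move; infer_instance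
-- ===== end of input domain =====

-- B replaces A's recursive DFS (shared mutable visited/max state) by an iterative DFS over an
-- explicit stack of (r, c, v) frames, children pushed so that pop order preserves A's pre-order;
-- same return value, no speed claim. Both ports thread the same call/pop-counting fuel, which is
-- a totalization device only (it exceeds the number of DFS calls possible on any input).

-- ===== PORT A =====
def pvArrGet (arr : List (List Int)) (r c : Int) : Option Int :=
  (PySem.List.pyGet? arr r).bind (fun row => PySem.List.pyGet? row c)

def pvExitOf (golem : List (Int × List (String × Int × Int))) (v : Int) : Option (Int × Int) :=
  ((PySem.Dict.mk golem).get? v).bind (fun d => (PySem.Dict.mk d).get? "exit")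

def pvCenterOf (golem : List (Int × List (String × Int × Int))) (v : Int) : Option (Int × Int) :=
  ((PySem.Dict.mk golem).get? v).bind (fun d => (PySem.Dict.mk d).get? "center")

abbrev pvSt := PySem.Set (Int × Int) × Int × Int

def move_dir : List (Int × Int) := [(-1, 0), (0, 1), (1, 0), (0, -1)]

mutual
def pvDfsA (golem : List (Int × List (String × Int × Int))) (arr : List (List Int))
    (r c v : Int) (f : Nat) (st : pvSt) : Option (pvSt × {g : Nat // g < f}) :=
  match f with
  | 0 => none
  | f' + 1 =>
    if st.1.contains (r, c) then some (st, ⟨f', Nat.lt_succ_self f'⟩)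
    else
      match pvArrGet arr r c with
      | none => none
      | some a =>
        if a == 1 || a == 0 then some (st, ⟨f', Nat.lt_succ_self f'⟩)
        else
          let st' : pvSt := (PySem.Set.add st.1 (r, c), if st.2.1 < r then (r, c) else st.2)
          match pvRunMoves golem arr move_dir r c v f' st' with
          | none => none
          | some (st2, ⟨g, hg⟩) => some (st2, ⟨g, by omega⟩)
termination_by (f, 0)
decreasing_by exact Prod.Lex.left _ _ (by omega)

def pvRunMoves (golem : List (Int × List (String × Int × Int))) (arr : List (List Int))
    (ms : List (Int × Int)) (r c v : Int) (f : Nat) (st : pvSt) : Option (pvSt × {g : Nat // g ≤ f}) :=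
  match ms with
  | [] => some (st, ⟨f, Nat.le_refl f⟩)
  | m :: rest =>
    let nr := r + m.1
    let nc := c + m.2
    match pvArrGet arr nr nc with
    | none => none
    | some na =>
      if na == v then
        match pvDfsA golem arr nr nc v f st with
        | none => none
        | some (st1, ⟨g, hg⟩) =>
          match pvRunMoves golem arr rest r c v g st1 with
          | none => none
          | some (st2, ⟨g2, h2⟩) => some (st2, ⟨g2, by omega⟩)
      else
        match pvExitOf golem v with
        | none => none
        | some ex =>
          if (r, c) == ex then
            match pvDfsA golem arr nr nc na f st with
            | none => none
            | some (st1, ⟨g, hg⟩) =>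
              match pvRunMoves golem arr rest r c v g st1 with
              | none => none
              | some (st2, ⟨g2, h2⟩) => some (st2, ⟨g2, by omega⟩)
          else pvRunMoves golem arr rest r c v f st
termination_by (f, ms.length + 1)
decreasing_by all_goals first
  | exact Prod.Lex.left _ _ (by omega)
  | exact Prod.Lex.right _ (by simp only [List.length_cons]; omega)
end

def pvFuel (arr : List (List Int)) : Nat :=
  16 * (arr.foldl (fun s row => s + row.length) 0) + 32

def fary_move (g_num : Int) (golem_dic : List (Int × List (String × Int × Int))) (arr : List (List Int)) : List Int :=
  match pvCenterOf golem_dic g_num with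
  | none => []
  | some (cr, cc) =>
    match pvDfsA golem_dic arr cr cc g_num (pvFuel arr) (PySem.Set.empty, cr, cc) with
    | none => []
    | some (st, _) => [st.2.1, st.2.2]


-- ===== PORT B =====
def pvChildFrames (golem : List (Int × List (String × Int × Int))) (arr : List (List Int))
    (ms : List (Int × Int)) (r c v : Int) : Option (List (Int × Int × Int)) :=
  match ms with
  | [] => some []
  | m :: rest =>
    let nr := r + m.1
    let nc := c + m.2
    match pvArrGet arr nr nc with
    | none => none
    | some na =>
      if na == v then
        (pvChildFrames golem arr rest r c v).map (fun L => (nr, nc, v) :: L)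
      else
        match pvExitOf golem v with
        | none => none
        | some ex =>
          if (r, c) == ex then
            (pvChildFrames golem arr rest r c v).map (fun L => (nr, nc, na) :: L)
          else pvChildFrames golem arr rest r c v

def pvRunB (golem : List (Int × List (String × Int × Int))) (arr : List (List Int))
    (f : Nat) (frames : List (Int × Int × Int)) (st : pvSt) : Option pvSt :=
  match frames with
  | [] => some st
  | (r, c, v) :: rest =>
    match f with
    | 0 => none
    | f' + 1 =>
      if st.1.contains (r, c) then pvRunB golem arr f' rest st
      else
        match pvArrGet arr r c with
        | none => none
        | some a =>
          if a == 1 || a == 0 then pvRunB golem arr f' rest st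
          else
            let st' : pvSt := (PySem.Set.add st.1 (r, c), if st.2.1 < r then (r, c) else st.2)
            match pvChildFrames golem arr move_dir r c v with
            | none => none
            | some L => pvRunB golem arr f' (L ++ rest) st'
termination_by (f, frames)
decreasing_by all_goals exact Prod.Lex.left _ _ (by omega)

def fary_move_alt (g_num : Int) (golem_dic : List (Int × List (String × Int × Int))) (arr : List (List Int)) : List Int :=
  match pvCenterOf golem_dic g_num with
  | none => []
  | some (cr, cc) =>
    match pvRunB golem_dic arr (pvFuel arr) [(cr, cc, g_num)] (PySem.Set.empty, cr, cc) with
    | none => []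
    | some st => [st.2.1, st.2.2]

-- ===== PRECONDITION & SPEC =====
-- Pre_ admits immediate-return inputs (center cell is a 0/1 wall, or a one-step dead end) and
-- otherwise conservatively requires a rectangular grid with a 0/1 border, in-range center and
-- "exit" entries for every non-wall value: it excludes the inputs where A's DFS raises
-- (IndexError via negative wraparound or out-of-range neighbours, KeyError on missing dict keys)
-- and, being conservative, also some lucky non-conforming grids on which A still returns.
def pvOneStep (golem : List (Int × List (String × Int × Int))) (arr : List (List Int)) (g cr cc : Int) : Bool :=
  match pvExitOf golem g with
  | none => false
  | some ex =>
    (!((cr, cc) == ex)) && move_dir.all (fun m =>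
      match pvArrGet arr (cr + m.1) (cc + m.2) with
      | none => false
      | some na => na != g)

def pvSafe (golem : List (Int × List (String × Int × Int))) (arr : List (List Int)) (g cr cc : Int) : Bool :=
  let C := (arr.headD []).length
  decide (0 < arr.length) && decide (0 < C) &&
  arr.all (fun row => row.length == C) &&
  (arr.headD []).all (fun x => x == 0 || x == 1) &&
  (arr.getLastD []).all (fun x => x == 0 || x == 1) &&
  arr.all (fun row => (row.headD 0 == 0 || row.headD 0 == 1) && (row.getLastD 0 == 0 || row.getLastD 0 == 1)) &&
  arr.all (fun row => row.all (fun x => x == 0 || x == 1 || (pvExitOf golem x).isSome)) &&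
  (pvExitOf golem g).isSome &&
  decide (0 ≤ cr) && decide (cr < (arr.length : Int)) && decide (0 ≤ cc) && decide (cc < (C : Int))

def pvPreCheck (g_num : Int) (golem_dic : List (Int × List (String × Int × Int))) (arr : List (List Int)) : Bool :=
  match pvCenterOf golem_dic g_num with
  | none => false
  | some (cr, cc) =>
    match pvArrGet arr cr cc with
    | none => false
    | some a =>
      (a == 0 || a == 1) || pvOneStep golem_dic arr g_num cr cc || pvSafe golem_dic arr g_num cr cc

def Pre_fary_move (g_num : Int) (golem_dic : List (Int × List (String × Int × Int))) (arr : List (List Int)) : Prop :=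
  pvPreCheck g_num golem_dic arr = true
instance (g_num : Int) (golem_dic : List (Int × List (String × Int × Int))) (arr : List (List Int)) : Decidable (Pre_fary_move g_num golem_dic arr) := by unfold Pre_fary_move; infer_instance

def pvWitness_fary_move : Int × (List (Int × List (String × Int × Int))) × List (List Int) :=
  (2, [(2, [("center", (1, 1)), ("exit", (1, 1))])], [[0, 0, 0], [0, 2, 0], [0, 0, 0]])

def Spec_fary_move (g_num : Int) (golem_dic : List (Int × List (String × Int × Int))) (arr : List (List Int)) (out : List Int) : Prop := out = fary_move_alt g_num golem_dic arr
instance (g_num : Int) (golem_dic : List (Int × List (String × Int × Int))) (arr : List (List Int)) (out : List Int) : Decidable (Spec_fary_move g_num golem_dic arr out) := by unfold Spec_fary_move; infer_instance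

-- ===== CLAIM (what is proved, stated in full; the proofs are below) =====
def Claim_equal_fary_move : Prop := ∀ (g_num : Int) (golem_dic : List (Int × List (String × Int × Int))) (arr : List (List Int)), Dom_fary_move g_num golem_dic arr → Pre_fary_move g_num golem_dic arr → Spec_fary_move g_num golem_dic arr (fary_move g_num golem_dic arr)

-- ===== LEMMAS AND PROOFS =====

-- if B's eager child computation fails (a neighbour read / exit lookup raises), then A's
-- sequential move loop fails too, whatever fuel and state it starts from
theorem pvChildFrames_none (golem : List (Int × List (String × Int × Int))) (arr : List (List Int))
    (ms : List (Int × Int)) (r c v : Int) (h : pvChildFrames golem arr ms r c v = none) :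
    ∀ (f : Nat) (st : pvSt), pvRunMoves golem arr ms r c v f st = none := by
  induction ms with
  | nil => simp [pvChildFrames] at h
  | cons m rest ih =>
    intro f st
    cases h1 : pvArrGet arr (r + m.1) (c + m.2) with
    | none => simp [pvRunMoves, h1]
    | some na =>
      simp only [pvChildFrames, h1] at h
      simp only [pvRunMoves, h1]
      by_cases hv : na = v
      · subst hv
        simp only [beq_self_eq_true, if_true, Option.map_eq_none_iff] at h
        cases hd : pvDfsA golem arr (r + m.1) (c + m.2) na f st with
        | none => simp
        | some q =>
          obtain ⟨st1, g, hg⟩ := q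
          simp [ih h]
      · have hv' : (na == v) = false := by simp [hv]
        simp only [hv', Bool.false_eq_true, if_false] at h ⊢
        cases he : pvExitOf golem v with
        | none => simp only [he] at h ⊢
        | some ex =>
          simp only [he] at h ⊢
          by_cases hx : (r, c) = ex
          · simp only [hx, beq_self_eq_true, if_true, Option.map_eq_none_iff] at h ⊢
            cases hd : pvDfsA golem arr (r + m.1) (c + m.2) na f st with
            | none => simp
            | some q =>
              obtain ⟨st1, g, hg⟩ := q
              simp [ih h]
          · have hx' : ((r, c) == ex) = false := by simp [hx]
            simp only [hx', Bool.false_eq_true, if_false] at h ⊢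
            exact ih h f st

-- processing the frames of one move list, then the rest of the stack, equals A's move loop
-- followed by the rest of the stack (fuel threaded identically)
theorem pvRunB_frames (golem : List (Int × List (String × Int × Int))) (arr : List (List Int))
    (ms : List (Int × Int)) :
    ∀ (f : Nat),
      (∀ g, g ≤ f → ∀ (r c v : Int) (rest : List (Int × Int × Int)) (st : pvSt),
        pvRunB golem arr g ((r, c, v) :: rest) st =
          match pvDfsA golem arr r c v g st with
          | none => none
          | some (st', gg) => pvRunB golem arr gg.1 rest st') →
      ∀ (r c v : Int) (L : List (Int × Int × Int)) (rest : List (Int × Int × Int)) (st : pvSt),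
        pvChildFrames golem arr ms r c v = some L →
        pvRunB golem arr f (L ++ rest) st =
          match pvRunMoves golem arr ms r c v f st with
          | none => none
          | some (st', gg) => pvRunB golem arr gg.1 rest st' := by
  induction ms with
  | nil =>
    intro f H r c v L rest st hC
    simp only [pvChildFrames, Option.some.injEq] at hC
    subst hC
    simp only [pvRunMoves, List.nil_append]
  | cons m rest' ih =>
    intro f H r c v L rest st hC
    cases h1 : pvArrGet arr (r + m.1) (c + m.2) with
    | none => simp [pvChildFrames, h1] at hC
    | some na =>
      simp only [pvChildFrames, h1] at hC
      simp only [pvRunMoves, h1]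
      by_cases hv : na = v
      · subst hv
        simp only [beq_self_eq_true, if_true] at hC ⊢
        cases hrec : pvChildFrames golem arr rest' r c na with
        | none => simp [hrec] at hC
        | some L' =>
          rw [hrec] at hC
          simp only [Option.map_some, Option.some.injEq] at hC
          subst hC
          rw [List.cons_append, H f le_rfl]
          cases hd : pvDfsA golem arr (r + m.1) (c + m.2) na f st with
          | none => simp
          | some q =>
            obtain ⟨st1, g, hg⟩ := q
            dsimp only
            rw [ih g (fun g' hg' => H g' (hg'.trans hg.le)) r c na L' rest st1 hrec]
            cases hm : pvRunMoves golem arr rest' r c na g st1 with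
            | none => simp
            | some q2 =>
              obtain ⟨st2, g2, h2⟩ := q2
              simp
      · have hv' : (na == v) = false := by simp [hv]
        simp only [hv', Bool.false_eq_true, if_false] at hC ⊢
        cases he : pvExitOf golem v with
        | none => simp [he] at hC
        | some ex =>
          simp only [he] at hC ⊢
          by_cases hx : (r, c) = ex
          · simp only [hx, beq_self_eq_true, if_true] at hC ⊢
            cases hrec : pvChildFrames golem arr rest' r c v with
            | none => simp [hrec] at hC
            | some L' =>
              rw [hrec] at hC
              simp only [Option.map_some, Option.some.injEq] at hC
              subst hC
              rw [List.cons_append, H f le_rfl]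
              cases hd : pvDfsA golem arr (r + m.1) (c + m.2) na f st with
              | none => simp
              | some q =>
                obtain ⟨st1, g, hg⟩ := q
                dsimp only
                rw [ih g (fun g' hg' => H g' (hg'.trans hg.le)) r c v L' rest st1 hrec]
                cases hm : pvRunMoves golem arr rest' r c v g st1 with
                | none => simp
                | some q2 =>
                  obtain ⟨st2, g2, h2⟩ := q2
                  simp
          · have hx' : ((r, c) == ex) = false := by simp [hx]
            simp only [hx', Bool.false_eq_true, if_false] at hC ⊢
            exact ih f H r c v L rest st hC

-- popping one frame and continuing equals one recursive DFS call and continuing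
theorem pvRunB_eq_dfs (golem : List (Int × List (String × Int × Int))) (arr : List (List Int)) :
    ∀ (f : Nat) (r c v : Int) (rest : List (Int × Int × Int)) (st : pvSt),
      pvRunB golem arr f ((r, c, v) :: rest) st =
        match pvDfsA golem arr r c v f st with
        | none => none
        | some (st', gg) => pvRunB golem arr gg.1 rest st' := by
  intro f
  induction f using Nat.strong_induction_on with
  | _ f ih =>
    intro r c v rest st
    cases f with
    | zero => simp [pvRunB, pvDfsA]
    | succ f' =>
      simp only [pvRunB, pvDfsA]
      by_cases hc : (r, c) ∈ st.1
      · simp [hc]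
      · simp only [PySem.Set.contains_eq_listContains, List.contains_eq_mem, hc,
          decide_false, Bool.false_eq_true, if_false]
        cases h1 : pvArrGet arr r c with
        | none => rfl
        | some a =>
          by_cases ha : (a == 1 || a == 0) = true
          · simp [ha]
          · simp only [ha, Bool.false_eq_true, if_false]
            cases hcf : pvChildFrames golem arr move_dir r c v with
            | none =>
              rw [pvChildFrames_none golem arr move_dir r c v hcf f']
            | some L =>
              dsimp only
              rw [pvRunB_frames golem arr move_dir f'
                    (fun g hg => ih g (Nat.lt_succ_of_le hg)) r c v L rest
                    (PySem.Set.add st.1 (r, c), if st.2.1 < r then (r, c) else st.2) hcf]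
              cases hm : pvRunMoves golem arr move_dir r c v f'
                  (PySem.Set.add st.1 (r, c), if st.2.1 < r then (r, c) else st.2) with
              | none => rfl
              | some q =>
                obtain ⟨st2, g2, h2⟩ := q
                rfl

-- ===== VERDICT (by name: the statement is the Claim_ definition above) =====
theorem fary_move_spec : Claim_equal_fary_move := by
  intro g_num golem_dic arr _ _
  unfold Spec_fary_move fary_move fary_move_alt
  cases hc : pvCenterOf golem_dic g_num with
  | none => rfl
  | some p =>
    obtain ⟨cr, cc⟩ := p
    dsimp only
    rw [pvRunB_eq_dfs]
    cases hd : pvDfsA golem_dic arr cr cc g_num (pvFuel arr) (PySem.Set.empty, cr, cc) with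
    | none => rfl
    | some q => obtain ⟨st', gg⟩ := q; simp [pvRunB]
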